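-- pv_equiv track=rewrite | github.com/pradeep-automation/Python-Practice | HighestSum.py | highest_sum
-- ===== SOURCE A (Python) =====
-- def highest_sum(nums:list):
--     # highest = 0
--     # for i in range(len(nums)):
--     #     for j in range(len(nums)):
--     #         sum = nums[i] + nums[j]
--     #         if sum >= highest and i != j:
--     #             highest = sum
--     # return highest
--     high = 0
--     sec_high = 0
--     for num in nums:
--         if num > high:
--             sec_high = high
--             high = num
--         elif num > sec_high:
--             sec_high = num
--     return high + sec_high
-- ===== SOURCE B (Python) =====
-- def highest_sum(nums: list):
--     s = sorted(nums, reverse=True)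
--     a = s[0] if len(s) >= 1 else 0
--     b = s[1] if len(s) >= 2 else 0
--     return max(a, 0) + max(b, 0)
-- ===== Notes on version B (the rewrite author's own statement) =====
-- stated objective: alternative
-- what changed: Replaces A's single-pass two-maximum tracking loop with sort-descending-then-index: take the first two elements of sorted(nums, reverse=True) (0 if absent) and sum their non-negative parts, which reproduces A's 0-initialised accumulators.
import Mathlib
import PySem

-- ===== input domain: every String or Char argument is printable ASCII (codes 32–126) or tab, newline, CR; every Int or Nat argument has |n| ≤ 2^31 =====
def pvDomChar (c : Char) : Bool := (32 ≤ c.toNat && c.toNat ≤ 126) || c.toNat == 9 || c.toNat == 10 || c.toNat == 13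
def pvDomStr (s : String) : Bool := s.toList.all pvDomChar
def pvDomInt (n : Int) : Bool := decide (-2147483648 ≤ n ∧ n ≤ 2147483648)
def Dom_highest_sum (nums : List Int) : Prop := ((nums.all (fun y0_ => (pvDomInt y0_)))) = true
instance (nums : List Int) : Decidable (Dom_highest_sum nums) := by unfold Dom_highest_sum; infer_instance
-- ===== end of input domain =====

-- B replaces A's single-pass two-maximum tracking with sort-descending-then-index (same values, different algorithm).

-- ===== PORT A =====
-- the loop body: update the (high, sec_high) pair with num
def hsStep (st : Int × Int) (num : Int) : Int × Int :=
  if num > st.1 then (num, st.1)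
  else if num > st.2 then (st.1, num)
  else st

def highest_sum (nums : List Int) : Int :=
  let p := nums.foldl hsStep ((0 : Int), (0 : Int))
  p.1 + p.2

-- ===== PORT B =====
def highest_sum_alt (nums : List Int) : Int :=
  let s := PySem.List.sorted nums (fun x => x) true
  let a := if 1 ≤ s.length then (PySem.List.pyGet? s 0).getD 0 else 0
  let b := if 2 ≤ s.length then (PySem.List.pyGet? s 1).getD 0 else 0
  max a 0 + max b 0

-- ===== PRECONDITION & SPEC =====
def Spec_highest_sum (nums : List Int) (out : Int) : Prop := out = highest_sum_alt nums
instance (nums : List Int) (out : Int) : Decidable (Spec_highest_sum nums out) := by unfold Spec_highest_sum; infer_instance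

-- ===== CLAIM (what is proved, stated in full; the proofs are below) =====
def Claim_equal_highest_sum : Prop := ∀ (nums : List Int), Dom_highest_sum nums → Spec_highest_sum nums (highest_sum nums)

-- ===== LEMMAS AND PROOFS =====

-- the two-max update is right-commutative, so A's fold is permutation-invariant
theorem hsStep_rightComm : ∀ (st : Int × Int) (a b : Int),
    hsStep (hsStep st a) b = hsStep (hsStep st b) a := by
  intro st a b
  simp only [hsStep]
  split_ifs <;> simp_all <;> omega

-- once every remaining element is ≤ sec_high, the state no longer changes
theorem hsStep_fold_stable (t : List Int) (h s : Int) (hsh : s ≤ h)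
    (ht : ∀ c ∈ t, c ≤ s) : t.foldl hsStep (h, s) = (h, s) := by
  induction t with
  | nil => rfl
  | cons c t ih =>
      have hc : c ≤ s := ht c (by simp)
      have : hsStep (h, s) c = (h, s) := by
        simp only [hsStep]; split_ifs <;> (try rfl) <;> omega
      simp only [List.foldl_cons, this]
      exact ih (fun x hx => ht x (by simp [hx]))

-- A's fold over a descending list is (s₀ ⊔ 0, s₁ ⊔ 0)
theorem fold_desc (s : List Int) (hp : s.Pairwise (fun a b => b ≤ a)) :
    s.foldl hsStep ((0 : Int), (0 : Int)) =
      (max (s.headD 0) 0, max ((s.drop 1).headD 0) 0) := by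
  match s with
  | [] => simp
  | [a] =>
      simp only [List.foldl_cons, List.foldl_nil, hsStep]
      split_ifs <;> simp <;> omega
  | a :: b :: t =>
      have hab : b ≤ a := (List.pairwise_cons.mp hp).1 b (by simp)
      have hbt : ∀ c ∈ t, c ≤ b :=
        (List.pairwise_cons.mp (List.pairwise_cons.mp hp).2).1
      have h1 : hsStep ((0 : Int), (0 : Int)) a = (max a 0, 0) := by
        simp only [hsStep]; split_ifs <;> simp <;> omega
      have h2 : hsStep (max a 0, (0 : Int)) b = (max a 0, max b 0) := by
        simp only [hsStep]; split_ifs <;> simp <;> omega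
      have h3 : t.foldl hsStep (max a 0, max b 0) = (max a 0, max b 0) := by
        apply hsStep_fold_stable
        · omega
        · intro c hc; have := hbt c hc; omega
      simp only [List.foldl_cons, h1, h2, h3, List.headD, List.drop]

-- ===== VERDICT (by name: the statement is the Claim_ definition above) =====
theorem highest_sum_spec : Claim_equal_highest_sum := by
  intro nums _
  unfold Spec_highest_sum highest_sum highest_sum_alt
  set s := PySem.List.sorted nums (fun x => x) true with hs
  have hperm : s.Perm nums := PySem.List.sorted_perm nums (fun x => x) true
  have hpair : s.Pairwise (fun a b => b ≤ a) :=
    PySem.List.sorted_pairwise_rev nums (fun x => x)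
  haveI : RightCommutative hsStep := ⟨fun st a b => hsStep_rightComm st a b⟩
  have hfold : nums.foldl hsStep ((0 : Int), (0 : Int)) =
      s.foldl hsStep ((0 : Int), (0 : Int)) :=
    (hperm.foldl_eq (f := hsStep) _).symm
  rw [hfold, fold_desc s hpair]
  match s with
  | [] => simp
  | [a] => simp [PySem.List.pyGet?, PySem.List.pyIdx?]
  | a :: b :: t => simp [PySem.List.pyGet?, PySem.List.pyIdx?, show (0:Int) ≤ (t.length:Int) + 1 by positivity]
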